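-- pv_equiv track=rewrite | github.com/Plantin7/ArianeGame-Outils_Logiciels | TP2/asci_art.py | info_letter
-- ===== SOURCE A (Python) =====
-- def info_letter(array):
--     longest_line = 0
--     # get the longest line for a letter
--     for line in array:
--         if longest_line < len(line.strip("\n")):
--             longest_line = len(line.strip("\n"))
--
--     # create an array of array with the longuest line
--     letter = [[" " for _ in range(longest_line)] for _ in range(8)]
--
--     # fill my array of array
--     for i, line, in enumerate(array):
--         for j, c in enumerate(line.strip('\n')):
--             letter[i][j] = c
--
--     # Reduce the array of array of character to array of string
--     for i, line in enumerate(letter):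
--         letter[i] = ''.join(line)
--
--     return letter
-- ===== SOURCE B (Python) =====
-- def info_letter(array):
--     width = max((len(l.strip("\n")) for l in array), default=0)
--     rows = [" " * width] * 8
--     for i, line in enumerate(array):
--         rows[i] = line.strip("\n").ljust(width)
--     return rows
-- ===== Notes on version B (the rewrite author's own statement) =====
-- stated objective: idiomatic
-- what changed: B keeps a flat list of 8 padded strings built with max(default=0) and ljust instead of A's 2D list-of-lists of characters with a per-character fill loop and a final join pass.
import Mathlib
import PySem

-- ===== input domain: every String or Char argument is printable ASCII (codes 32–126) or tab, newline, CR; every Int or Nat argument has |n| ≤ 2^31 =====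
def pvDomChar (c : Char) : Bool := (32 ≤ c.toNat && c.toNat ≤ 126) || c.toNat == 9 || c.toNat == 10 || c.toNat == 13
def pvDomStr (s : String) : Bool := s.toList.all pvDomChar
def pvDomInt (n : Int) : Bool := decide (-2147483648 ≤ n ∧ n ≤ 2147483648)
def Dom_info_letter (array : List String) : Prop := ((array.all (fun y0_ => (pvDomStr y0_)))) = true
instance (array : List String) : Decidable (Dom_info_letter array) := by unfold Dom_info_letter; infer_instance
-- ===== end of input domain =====

-- B keeps a flat list of 8 padded strings (max(default=0) + ljust) instead of A's 2D
-- list-of-lists of characters with a per-character fill loop and a final join pass;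
-- equal return values proved for arrays of at most 8 lines (beyond that B raises IndexError).

-- shared helper: line.strip("\n") as a character list
def pvStrip (s : String) : List Char := PySem.Chars.stripChars s.toList ['\n']

-- ===== PORT A =====
def info_letter (array : List String) : List String :=
  let longest : Nat :=
    array.foldl (fun acc line =>
      if acc < (pvStrip line).length then (pvStrip line).length else acc) 0
  let letter0 : List (List Char) :=
    (List.range 8).map (fun _ => (List.range longest).map (fun _ => ' '))
  let letter :=
    (PySem.List.enumerate array).foldl
      (fun lt p =>
        lt.modify p.1.toNat (fun row =>
          (PySem.List.enumerate (pvStrip p.2)).foldl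
            (fun r q => r.set q.1.toNat q.2) row)) letter0
  -- ''.join over a row of single characters = the string of that char list
  letter.map (fun row => String.ofList row)

-- ===== PORT B =====
def info_letter_alt (array : List String) : List String :=
  -- max((len(l.strip("\n")) for l in array), default=0): over Nats this is a max-fold from 0
  let width : Nat := (array.map (fun l => (pvStrip l).length)).foldl max 0
  let rows : List String := List.replicate 8 (String.ofList (List.replicate width ' '))
  (PySem.List.enumerate array).foldl
    (fun rs p =>
      -- line.strip("\n").ljust(width): pad on the right with spaces up to width
      rs.set p.1.toNat
        (String.ofList (pvStrip p.2 ++ List.replicate (width - (pvStrip p.2).length) ' '))) rows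

-- ===== PRECONDITION & SPEC =====
-- Pre_ excludes arrays of more than 8 lines: there A's letter[i][j] assignment raises
-- IndexError (except that extra lines which strip to "" are silently dropped, an accident
-- of the empty inner loop), and B's rows[i] assignment raises IndexError on any 9th line,
-- so B raises where A either raises or accidentally drops lines.
def Pre_info_letter (array : List String) : Prop := array.length ≤ 8
instance (array : List String) : Decidable (Pre_info_letter array) := by unfold Pre_info_letter; infer_instance
def pvWitness_info_letter : List String := ["ab\n", "c"]
def Spec_info_letter (array : List String) (out : List String) : Prop := out = info_letter_alt array
instance (array : List String) (out : List String) : Decidable (Spec_info_letter array out) := by unfold Spec_info_letter; infer_instance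

-- ===== CLAIM (what is proved, stated in full; the proofs are below) =====
def Claim_equal_info_letter : Prop := ∀ (array : List String), Dom_info_letter array → Pre_info_letter array → Spec_info_letter array (info_letter array)

-- ===== LEMMAS AND PROOFS =====

-- folding `if acc < f x then f x else acc` is folding `max` of the images
lemma pv_foldl_if_max {β : Type} (l : List β) (f : β → Nat) (a : Nat) :
    l.foldl (fun acc x => if acc < f x then f x else acc) a
      = l.foldl (fun acc x => max acc (f x)) a := by
  induction l generalizing a with
  | nil => rfl
  | cons x xs ih =>
      simp only [List.foldl_cons]
      have hax : (if a < f x then f x else a) = max a (f x) := by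
        split_ifs with h <;> omega
      rw [hax, ih]

lemma pv_init_le_foldl_max (l : List Nat) (a : Nat) : a ≤ l.foldl max a := by
  induction l generalizing a with
  | nil => simp
  | cons x xs ih => exact le_trans (le_max_left a x) (ih (max a x))

lemma pv_mem_le_foldl_max (l : List Nat) (a x : Nat) (hx : x ∈ l) : x ≤ l.foldl max a := by
  induction l generalizing a with
  | nil => cases hx
  | cons y ys ih =>
      rcases List.mem_cons.mp hx with h | h
      · subst h
        exact le_trans (le_max_right a x) (pv_init_le_foldl_max ys (max a x))
      · exact ih _ h

-- an enumerate-driven fold of `modify` writes each position once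
lemma pv_enumFold_modify_getElem? {α β : Type} (xs : List β) (f : β → α → α)
    (k : Nat) (r : List α) (i : Nat) :
    ((PySem.List.enumerate xs (k : Int)).foldl
        (fun r p => r.modify p.1.toNat (f p.2)) r)[i]?
      = if h : k ≤ i ∧ i < k + xs.length then r[i]?.map (f (xs[i - k]'(by omega))) else r[i]? := by
  induction xs generalizing k r with
  | nil =>
      rw [PySem.List.enumerate_nil]
      simp only [List.foldl_nil]
      rw [dif_neg (by simp only [List.length_nil]; omega)]
  | cons x xs ih =>
      rw [PySem.List.enumerate_cons]
      simp only [List.foldl_cons, Int.toNat_natCast]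
      rw [show (k : Int) + 1 = ((k + 1 : Nat) : Int) by push_cast; ring]
      rw [ih]
      rcases Nat.lt_trichotomy i k with hik | hik | hik
      · rw [dif_neg (by omega), dif_neg (by simp only [List.length_cons]; omega),
            List.getElem?_modify]
        have hne : k ≠ i := by omega
        simp [hne]
      · subst hik
        rw [dif_neg (by omega), dif_pos (by simp only [List.length_cons]; omega),
            List.getElem?_modify]
        simp
      · by_cases h2 : i < k + 1 + xs.length
        · rw [dif_pos (by omega), dif_pos (by simp only [List.length_cons]; omega),
              List.getElem?_modify]
          have hne : k ≠ i := by omega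
          have hsub : i - k = (i - (k + 1)) + 1 := by omega
          simp [hne, hsub]
        · rw [dif_neg (by omega), dif_neg (by simp only [List.length_cons]; omega),
              List.getElem?_modify]
          have hne : k ≠ i := by omega
          simp [hne]

-- an enumerate-driven fold of `set` (all writes in range) writes each position once
lemma pv_enumFold_set_getElem? {α β : Type} (xs : List β) (v : β → α)
    (k : Nat) (r : List α) (hlen : k + xs.length ≤ r.length) (i : Nat) :
    ((PySem.List.enumerate xs (k : Int)).foldl
        (fun r p => r.set p.1.toNat (v p.2)) r)[i]?
      = if h : k ≤ i ∧ i < k + xs.length then some (v (xs[i - k]'(by omega))) else r[i]? := by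
  induction xs generalizing k r with
  | nil =>
      rw [PySem.List.enumerate_nil]
      simp only [List.foldl_nil]
      rw [dif_neg (by simp only [List.length_nil]; omega)]
  | cons x xs ih =>
      rw [PySem.List.enumerate_cons]
      simp only [List.foldl_cons, Int.toNat_natCast]
      rw [show (k : Int) + 1 = ((k + 1 : Nat) : Int) by push_cast; ring]
      rw [ih _ _ (by simp only [List.length_set]; simp only [List.length_cons] at hlen; omega)]
      rcases Nat.lt_trichotomy i k with hik | hik | hik
      · rw [dif_neg (by omega), dif_neg (by simp only [List.length_cons]; omega),
            List.getElem?_set]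
        have hne : k ≠ i := by omega
        simp [hne]
      · subst hik
        rw [dif_neg (by omega), dif_pos (by simp only [List.length_cons]; omega),
            List.getElem?_set]
        have hk : i < r.length := by simp only [List.length_cons] at hlen; omega
        simp [hk]
      · by_cases h2 : i < k + 1 + xs.length
        · rw [dif_pos (by omega), dif_pos (by simp only [List.length_cons]; omega)]
          have hsub : i - k = (i - (k + 1)) + 1 := by omega
          simp [hsub]
        · rw [dif_neg (by omega), dif_neg (by simp only [List.length_cons]; omega),
              List.getElem?_set]
          have hne : k ≠ i := by omega
          simp [hne]

-- filling a blank row of width w with the characters of s (len s ≤ w) = s padded with spaces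
lemma pv_fill_blank (s : List Char) (w : Nat) (hw : s.length ≤ w) :
    (PySem.List.enumerate s).foldl (fun r q => r.set q.1.toNat q.2) (List.replicate w ' ')
      = s ++ List.replicate (w - s.length) ' ' := by
  apply List.ext_getElem?
  intro i
  have h := pv_enumFold_set_getElem? (α := Char) (β := Char) s (fun c => c) 0
      (List.replicate w ' ') (by simp only [List.length_replicate]; omega) i
  simp only [Int.natCast_zero, Nat.sub_zero, Nat.zero_add, Nat.zero_le, true_and] at h
  rw [h]
  by_cases hlt : i < s.length
  · rw [dif_pos hlt, List.getElem?_append_left hlt]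
    simp [hlt]
  · rw [dif_neg hlt, List.getElem?_append_right (by omega)]
    rw [List.getElem?_replicate, List.getElem?_replicate]
    by_cases h2 : i < w
    · rw [if_pos h2, if_pos (by omega)]
    · rw [if_neg h2, if_neg (by omega)]

theorem info_letter_spec : Claim_equal_info_letter := by
  intro array _ hpre
  unfold Pre_info_letter at hpre
  unfold Spec_info_letter info_letter info_letter_alt
  dsimp only
  have hw : array.foldl (fun acc line =>
        if acc < (pvStrip line).length then (pvStrip line).length else acc) 0
      = (array.map (fun l => (pvStrip l).length)).foldl max 0 := by
    rw [List.foldl_map]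
    exact pv_foldl_if_max array (fun l => (pvStrip l).length) 0
  rw [hw]
  set w : Nat := (array.map (fun l => (pvStrip l).length)).foldl max 0 with hwdef
  have hblank : ((List.range 8).map (fun _ => (List.range w).map (fun _ => ' ')))
      = List.replicate 8 (List.replicate w ' ') := by
    simp [List.map_const']
  rw [hblank]
  apply List.ext_getElem?
  intro i
  rw [List.getElem?_map]
  have hA := pv_enumFold_modify_getElem? (α := List Char) (β := String) array
      (fun line row => (PySem.List.enumerate (pvStrip line)).foldl
          (fun r q => r.set q.1.toNat q.2) row)
      0 (List.replicate 8 (List.replicate w ' ')) i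
  have hB := pv_enumFold_set_getElem? (α := String) (β := String) array
      (fun line => String.ofList (pvStrip line ++ List.replicate (w - (pvStrip line).length) ' '))
      0 (List.replicate 8 (String.ofList (List.replicate w ' ')))
      (by simp only [List.length_replicate]; omega) i
  simp only [Int.natCast_zero, Nat.sub_zero, Nat.zero_add, Nat.zero_le, true_and] at hA hB
  rw [hA, hB]
  by_cases h : i < array.length
  · rw [dif_pos h, dif_pos h]
    have hi8 : i < 8 := by omega
    rw [List.getElem?_replicate, if_pos hi8]
    have hmem : (pvStrip (array[i]'h)).length ∈ array.map (fun l => (pvStrip l).length) :=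
      List.mem_map.mpr ⟨array[i]'h, List.getElem_mem h, rfl⟩
    have hle : (pvStrip (array[i]'h)).length ≤ w := pv_mem_le_foldl_max _ 0 _ hmem
    simp only [Option.map_some]
    rw [pv_fill_blank _ w hle]
  · rw [dif_neg h, dif_neg h]
    by_cases h8 : i < 8
    · rw [List.getElem?_replicate, List.getElem?_replicate, if_pos h8, if_pos h8]
      rfl
    · rw [List.getElem?_replicate, List.getElem?_replicate, if_neg h8, if_neg h8]
      rfl
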